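-- pv_equiv track=rewrite | github.com/soggycactus/algopractice | problems/longest_valid_parantheses/python/solution.py | is_valid_parantheses
-- ===== SOURCE A (Python) =====
-- def is_valid_parantheses(string: str) -> bool:
--     """
--     Returns whether a string is a valid parantheses
--     """
--
--     stack = list(zip(list(string), range(len(string))))
--     found = string.find("()")
--     while found != -1:
--         del stack[found]
--         del stack[found]
--         string = "".join([x[0] for x in stack])
--         found = string.find("()")
--
--     return [x[1] for x in stack]
-- ===== SOURCE B (Python) =====
-- def is_valid_parantheses(string: str) -> bool:
--     stack = []
--     for i, ch in enumerate(string):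
--         if ch == ')' and stack and stack[-1][1] == '(':
--             stack.pop()
--         else:
--             stack.append((i, ch))
--     return [i for i, ch in stack]
-- ===== Notes on version B (the rewrite author's own statement) =====
-- stated objective: alternative
-- what changed: Replaced the repeated find-'()'-and-delete-then-rebuild-the-string loop by a single left-to-right pass that keeps unmatched characters on a stack and pops a '(' when the next character is ')'.
import Mathlib
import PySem

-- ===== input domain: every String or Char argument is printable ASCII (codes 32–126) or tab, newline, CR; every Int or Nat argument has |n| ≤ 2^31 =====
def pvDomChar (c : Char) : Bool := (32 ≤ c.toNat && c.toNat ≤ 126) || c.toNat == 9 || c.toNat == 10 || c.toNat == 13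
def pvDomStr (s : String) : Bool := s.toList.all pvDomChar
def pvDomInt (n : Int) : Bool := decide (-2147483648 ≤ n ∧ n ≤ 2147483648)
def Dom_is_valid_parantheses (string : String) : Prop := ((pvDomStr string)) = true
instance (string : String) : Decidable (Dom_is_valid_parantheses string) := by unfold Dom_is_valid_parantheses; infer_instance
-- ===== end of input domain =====

-- B replaces A's repeated find-"()"-and-delete-and-rebuild loop by a single stack pass; same return value.

-- ===== PORT A =====
-- A's while loop: recompute string from the stack, find the first "()" occurrence,
-- delete its two elements, repeat until no occurrence.
def pvALoop (stack : List (Char × Int)) : List (Char × Int) :=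
  if _h : PySem.Chars.find (stack.map Prod.fst) ['(', ')'] = -1 then stack
  else
    pvALoop ((stack.eraseIdx (PySem.Chars.find (stack.map Prod.fst) ['(', ')']).toNat).eraseIdx
      (PySem.Chars.find (stack.map Prod.fst) ['(', ')']).toNat)
termination_by stack.length
decreasing_by
  have h0 : (0:Int) ≤ PySem.Chars.find (stack.map Prod.fst) ['(', ')'] := by
    have := PySem.Chars.neg_one_le_find (s := stack.map Prod.fst) (sub := ['(', ')'])
    omega
  have hpre := (PySem.Chars.find_spec (s := stack.map Prod.fst) (sub := ['(', ')']) h0).1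
  have hlen : (PySem.Chars.find (stack.map Prod.fst) ['(', ')']).toNat + 2 ≤ stack.length := by
    have := hpre.length_le
    simp [List.length_drop] at this
    omega
  simp only [List.attach_map_val (l := stack) (f := Prod.fst)]
  simp only [List.length_eraseIdx]
  split_ifs <;> omega

-- stack = list(zip(list(string), range(len(string)))); return [x[1] for x in stack]
def is_valid_parantheses (string : String) : List Int :=
  (pvALoop (string.toList.zip (PySem.List.pyRange 0 (string.toList.length : Int) 1))).map Prod.snd

-- ===== PORT B =====
-- one step of B's for loop: pop when ch = ')' and the stack top holds '(', else append
def pvAltStep (st : List (Int × Char)) (p : Int × Char) : List (Int × Char) :=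
  if p.2 = ')' ∧ st.getLast?.any (fun q => q.2 = '(') then st.dropLast
  else st ++ [p]

def is_valid_parantheses_alt (string : String) : List Int :=
  ((PySem.List.enumerate string.toList 0).foldl pvAltStep []).map Prod.fst

-- ===== PRECONDITION & SPEC =====
def Spec_is_valid_parantheses (string : String) (out : List Int) : Prop := out = is_valid_parantheses_alt string
instance (string : String) (out : List Int) : Decidable (Spec_is_valid_parantheses string out) := by unfold Spec_is_valid_parantheses; infer_instance

-- ===== CLAIM (what is proved, stated in full; the proofs are below) =====
def Claim_equal_is_valid_parantheses : Prop := ∀ (string : String), Dom_is_valid_parantheses string → Spec_is_valid_parantheses string (is_valid_parantheses string)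

-- ===== LEMMAS AND PROOFS =====

-- head-based (reversed-stack) version of B's step, on A's (Char × Int) pairs
def pvHStep (st : List (Char × Int)) (p : Char × Int) : List (Char × Int) :=
  if p.1 = ')' ∧ st.head?.any (fun q => q.1 = '(') then st.tail else p :: st

-- head-based version of B's step on B's (Int × Char) pairs
def pvKStep (st : List (Int × Char)) (p : Int × Char) : List (Int × Char) :=
  if p.2 = ')' ∧ st.head?.any (fun q => q.2 = '(') then st.tail else p :: st

lemma pvAltStep_eq (st : List (Int × Char)) (p : Int × Char) :
    pvAltStep st p = (pvKStep st.reverse p).reverse := by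
  simp only [pvAltStep, pvKStep, List.head?_reverse]
  split_ifs with h
  · simp [List.tail_reverse]
  · simp

lemma pvB_rev' : ∀ (l : List (Int × Char)) (st : List (Int × Char)),
    l.foldl pvAltStep st = (l.foldl pvKStep st.reverse).reverse := by
  intro l
  induction l with
  | nil => intro st; simp
  | cons p l ih =>
      intro st
      simp only [List.foldl_cons, pvAltStep_eq, ih, List.reverse_reverse]

lemma pvSwap_bridge : ∀ (m : List (Char × Int)) (st : List (Char × Int)),
    (m.map Prod.swap).foldl pvKStep (st.map Prod.swap) = (m.foldl pvHStep st).map Prod.swap := by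
  intro m
  induction m with
  | nil => intro st; simp
  | cons p m ih =>
      intro st
      simp only [List.map_cons, List.foldl_cons]
      have hstep : pvKStep (st.map Prod.swap) p.swap = (pvHStep st p).map Prod.swap := by
        cases p with
        | mk pc pi =>
          simp only [pvKStep, pvHStep]
          cases st with
          | nil => simp
          | cons q st' =>
            cases q with
            | mk qc qi =>
              by_cases h : pc = ')' ∧ qc = '('
              · simp [h]
              · simp [Prod.swap, h]
      rw [hstep, ih]

lemma pvEnum_zip : ∀ (l : List Char) (s : Int),
    PySem.List.enumerate l s = (l.zip (PySem.List.pyRange s (s + l.length) 1)).map Prod.swap := by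
  intro l
  induction l with
  | nil => intro s; simp [PySem.List.enumerate_nil, PySem.List.pyRange_one_eq_nil]
  | cons c l ih =>
      intro s
      have hlt : s < s + ((c :: l).length : Int) := by
        simp only [List.length_cons]
        push_cast
        omega
      have hb2 : s + 1 + (l.length : Int) = s + ((c :: l).length : Int) := by
        simp only [List.length_cons]
        push_cast
        omega
      rw [PySem.List.enumerate_cons, PySem.List.pyRange_one_cons hlt, List.zip_cons_cons,
        List.map_cons, ih (s + 1), hb2]
      rfl

-- removing one adjacent '(' ')' pair does not change the scan result
lemma pvPair_removal (u v : List (Char × Int)) (st : List (Char × Int)) (i j : Int) :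
    (u ++ ('(', i) :: (')', j) :: v).foldl pvHStep st = (u ++ v).foldl pvHStep st := by
  have hstep : ∀ st' : List (Char × Int), pvHStep (pvHStep st' ('(', i)) (')', j) = st' := by
    intro st'
    simp [pvHStep]
  simp only [List.foldl_append, List.foldl_cons, hstep]

-- when the character string has no adjacent "()" the scan keeps everything
lemma pvNoPair_fix : ∀ (l st : List (Char × Int)),
    ¬ (['(', ')'] <:+: (st.reverse.map Prod.fst ++ l.map Prod.fst)) →
    l.foldl pvHStep st = l.reverse ++ st := by
  intro l
  induction l with
  | nil => intro st _; simp
  | cons p l ih =>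
      intro st hno
      simp only [List.foldl_cons]
      have hpush : pvHStep st p = p :: st := by
        by_cases hc : p.1 = ')' ∧ st.head?.any (fun q => q.1 = '(')
        · exfalso
          obtain ⟨h1, h2⟩ := hc
          cases st with
          | nil => simp at h2
          | cons q st' =>
              have hq : q.1 = '(' := by simpa using h2
              apply hno
              refine ⟨(st'.reverse.map Prod.fst), l.map Prod.fst, ?_⟩
              simp [hq, h1]
        · simp [pvHStep, hc]
      rw [hpush, ih (p :: st)]
      · simp
      · intro hinf
        apply hno
        simpa using hinf
      
theorem pvALoop_eq_scan_aux : ∀ (N : Nat) (stack : List (Char × Int)), stack.length ≤ N →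
    pvALoop stack = (stack.foldl pvHStep []).reverse := by
  intro N
  induction N with
  | zero =>
      intro stack hle
      have hnil : stack = [] := List.length_eq_zero_iff.mp (Nat.le_zero.mp hle)
      subst hnil
      have hf : PySem.Chars.find (([] : List (Char × Int)).map Prod.fst) ['(', ')'] = -1 := by
        decide
      rw [pvALoop, dif_pos hf]
      simp
  | succ N ihN =>
      intro stack hle
      by_cases h : PySem.Chars.find (stack.map Prod.fst) ['(', ')'] = -1
      · rw [pvALoop, dif_pos h]
        have hno : ¬ (['(', ')'] <:+: stack.map Prod.fst) :=
          (PySem.Chars.find_eq_neg_one_iff _ _).mp h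
        rw [pvNoPair_fix stack []]
        · simp
        · simpa using hno
      · rw [pvALoop, dif_neg h]
        have h0 : (0:Int) ≤ PySem.Chars.find (stack.map Prod.fst) ['(', ')'] := by
          have := PySem.Chars.neg_one_le_find (s := stack.map Prod.fst) (sub := ['(', ')'])
          omega
        set n := (PySem.Chars.find (stack.map Prod.fst) ['(', ')']).toNat with hn
        have hpre := (PySem.Chars.find_spec (s := stack.map Prod.fst) (sub := ['(', ')']) h0).1
        have hlen : n + 2 ≤ stack.length := by
          have := hpre.length_le
          simp [List.length_drop] at this
          omega
        -- decompose stack = u ++ ('(', ai) :: (')', bi) :: v with u.length = n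
        obtain ⟨r, hr⟩ := hpre
        have hr' : (stack.drop n).map Prod.fst = '(' :: ')' :: r := by
          rw [List.map_drop, ← hr]
          rfl
        obtain ⟨a, rest, hcons⟩ : ∃ a rest, stack.drop n = a :: rest := by
          cases hd : stack.drop n with
          | nil => rw [hd] at hr'; simp at hr'
          | cons a rest => exact ⟨a, rest, rfl⟩
        obtain ⟨b, v, hcons2⟩ : ∃ b v, rest = b :: v := by
          rw [hcons] at hr'
          cases hd : rest with
          | nil => rw [hd] at hr'; simp at hr'
          | cons b v => exact ⟨b, v, rfl⟩
        rw [hcons, hcons2] at hr'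
        obtain ⟨ac, ai⟩ := a
        obtain ⟨bc, bi⟩ := b
        simp only [List.map_cons, List.cons.injEq] at hr'
        obtain ⟨ha, hb, -⟩ := hr'
        subst ha
        subst hb
        obtain ⟨u, hu, hulen⟩ : ∃ u, stack = u ++ ('(', ai) :: (')', bi) :: v ∧ u.length = n := by
          refine ⟨stack.take n, ?_, ?_⟩
          · conv_lhs => rw [← List.take_append_drop n stack]
            rw [hcons, hcons2]
          · simp [List.length_take]
            omega
        have herase : ((u ++ ('(', ai) :: (')', bi) :: v).eraseIdx n).eraseIdx n = u ++ v := by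
          rw [← hulen]
          rw [List.eraseIdx_append_of_length_le (le_refl _)]
          simp only [Nat.sub_self, List.eraseIdx_zero, List.tail_cons]
          rw [List.eraseIdx_append_of_length_le (le_refl _)]
          simp
        have hvlen : (u ++ v).length ≤ N := by
          have := congrArg List.length hu
          simp at this ⊢
          omega
        rw [hu, herase, ihN _ hvlen]
        congr 1
        rw [pvPair_removal]

theorem pvALoop_eq_scan (stack : List (Char × Int)) :
    pvALoop stack = (stack.foldl pvHStep []).reverse :=
  pvALoop_eq_scan_aux stack.length stack (le_refl _)

-- ===== VERDICT (by name: the statement is the Claim_ definition above) =====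
theorem is_valid_parantheses_spec : Claim_equal_is_valid_parantheses := by
  intro s _
  unfold Spec_is_valid_parantheses is_valid_parantheses is_valid_parantheses_alt
  rw [pvALoop_eq_scan]
  rw [pvEnum_zip s.toList 0]
  have h0 : (0 : Int) + (s.toList.length : Int) = (s.toList.length : Int) := by omega
  rw [h0]
  rw [pvB_rev']
  rw [show ([] : List (Int × Char)).reverse = (([] : List (Char × Int)).map Prod.swap) from rfl]
  rw [pvSwap_bridge]
  simp [Function.comp]
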